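-- pv_equiv track=rewrite | github.com/handhelpru/kukushka | ner.py | extract_articles
-- ===== SOURCE A (Python) =====
-- import itertools
--
-- def extract_articles(case_document_articles_record: str):
--     parts = case_document_articles_record[2:-2].split('", "')
--
--     # DIfferent Split cases
--     parts = list(itertools.chain(*[p.split("] [") for p in parts]))
--     parts = list(itertools.chain(*[p.split("; ") for p in parts]))
--     parts = [
--         p.replace(". ", ".")
--         .replace(" - ", ", ")
--         .replace("[", "")
--         .replace("]", "")
--         .replace("-", ", ")
--         for p in parts
--     ]
--     return parts
-- ===== SOURCE B (Python) =====
-- def extract_articles(case_document_articles_record: str):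
--     body = case_document_articles_record[2:-2]
--     parts = []
--     buf = []
--     i = 0
--     n = len(body)
--     while i < n:
--         if body.startswith('", "', i):
--             parts.append("".join(buf)); buf = []; i += 4
--         elif body.startswith("] [", i):
--             parts.append("".join(buf)); buf = []; i += 3
--         elif body.startswith("; ", i):
--             parts.append("".join(buf)); buf = []; i += 2
--         else:
--             buf.append(body[i]); i += 1
--     parts.append("".join(buf))
--     return [
--         p.replace(". ", ".")
--         .replace(" - ", ", ")
--         .replace("[", "")
--         .replace("]", "")
--         .replace("-", ", ")
--         for p in parts
--     ]
-- ===== Notes on version B (the rewrite author's own statement) =====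
-- stated objective: alternative
-- what changed: A's three sequential .split passes glued with itertools.chain are replaced by a single left-to-right scan that splits on all three delimiters in one pass; the trailing replace-chain comprehension is kept verbatim.
import Mathlib
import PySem

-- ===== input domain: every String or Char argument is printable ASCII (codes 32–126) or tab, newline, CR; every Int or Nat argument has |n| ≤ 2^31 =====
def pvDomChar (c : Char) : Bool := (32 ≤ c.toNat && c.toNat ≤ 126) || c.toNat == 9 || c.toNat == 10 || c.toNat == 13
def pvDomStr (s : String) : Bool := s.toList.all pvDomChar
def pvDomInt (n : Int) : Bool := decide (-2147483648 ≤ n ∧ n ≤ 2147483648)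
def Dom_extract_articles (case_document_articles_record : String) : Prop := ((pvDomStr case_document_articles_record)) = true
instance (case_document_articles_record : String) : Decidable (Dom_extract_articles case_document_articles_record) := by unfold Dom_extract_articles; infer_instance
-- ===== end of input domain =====

-- B replaces A's three sequential .split passes (flattened with itertools.chain) by ONE left-to-right
-- scan that splits on all three delimiters in a single pass; the replace chain is kept verbatim
-- (objective: alternative single-pass decomposition, same exact output).

-- ===== PORT A =====
-- the chained .replace comprehension (textually identical in A and B, so one shared helper)
def pvRepl (p : List Char) : List Char :=
  PySem.Chars.replace (PySem.Chars.replace (PySem.Chars.replace (PySem.Chars.replace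
    (PySem.Chars.replace p ['.', ' '] ['.']) [' ', '-', ' '] [',', ' ']) ['['] []) [']'] []) ['-'] [',', ' ']

def extract_articles (case_document_articles_record : String) : List String :=
  let parts0 := PySem.Chars.splitOn (PySem.Str.slice case_document_articles_record (some 2) (some (-2))).toList ['\"', ',', ' ', '\"']
  let parts1 := (parts0.map (fun p => PySem.Chars.splitOn p [']', ' ', '['])).flatten
  let parts2 := (parts1.map (fun p => PySem.Chars.splitOn p [';', ' '])).flatten
  parts2.map (fun p => String.ofList (pvRepl p))

-- ===== PORT B =====
-- one left-to-right pass over the characters, splitting at any of the three delimiters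
def pvScan (l : List Char) (buf : List Char) : List (List Char) :=
  match l with
  | [] => [buf]
  | c :: t =>
    if List.isPrefixOf ['\"', ',', ' ', '\"'] (c :: t) then buf :: pvScan ((c :: t).drop 4) []
    else if List.isPrefixOf [']', ' ', '['] (c :: t) then buf :: pvScan ((c :: t).drop 3) []
    else if List.isPrefixOf [';', ' '] (c :: t) then buf :: pvScan ((c :: t).drop 2) []
    else pvScan t (buf ++ [c])
termination_by l.length
decreasing_by all_goals simp

def extract_articles_alt (case_document_articles_record : String) : List String :=
  (pvScan (PySem.Str.slice case_document_articles_record (some 2) (some (-2))).toList []).map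
    (fun p => String.ofList (pvRepl p))

-- ===== PRECONDITION & SPEC =====
def Spec_extract_articles (case_document_articles_record : String) (out : List String) : Prop := out = extract_articles_alt case_document_articles_record
instance (case_document_articles_record : String) (out : List String) : Decidable (Spec_extract_articles case_document_articles_record out) := by unfold Spec_extract_articles; infer_instance

-- ===== CLAIM (what is proved, stated in full; the proofs are below) =====
def Claim_equal_extract_articles : Prop := ∀ (case_document_articles_record : String), Dom_extract_articles case_document_articles_record → Spec_extract_articles case_document_articles_record (extract_articles case_document_articles_record)

-- ===== LEMMAS AND PROOFS =====

-- a clean structural model of Python's s.split(sep) for a fixed non-empty sep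
def pvSplitR (sep : List Char) (l : List Char) : List (List Char) :=
  match l with
  | [] => [[]]
  | c :: t =>
    if h : sep ≠ [] ∧ List.isPrefixOf sep (c :: t) then
      [] :: pvSplitR sep ((c :: t).drop sep.length)
    else
      (pvSplitR sep t).modifyHead (c :: ·)
termination_by l.length
decreasing_by
  · have hp : sep <+: (c :: t) := by
      simpa [List.isPrefixOf_iff_prefix] using h.2
    have := hp.length_le
    have hs : 0 < sep.length := List.length_pos_iff.mpr h.1
    simp at this ⊢
    omega
  · simp

theorem pvSplitR_nil (sep : List Char) : pvSplitR sep [] = [[]] := by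
  simp [pvSplitR]

theorem pvSplitR_pos (sep : List Char) (c : Char) (t : List Char)
    (h1 : sep ≠ []) (h2 : List.isPrefixOf sep (c :: t)) :
    pvSplitR sep (c :: t) = [] :: pvSplitR sep ((c :: t).drop sep.length) := by
  rw [pvSplitR]; rw [dif_pos ⟨h1, h2⟩]

theorem pvSplitR_neg (sep : List Char) (c : Char) (t : List Char)
    (h2 : ¬ List.isPrefixOf sep (c :: t)) :
    pvSplitR sep (c :: t) = (pvSplitR sep t).modifyHead (c :: ·) := by
  rw [pvSplitR]; rw [dif_neg (by tauto)]

theorem pvSplitR_ne_nil (sep : List Char) (l : List Char) : pvSplitR sep l ≠ [] := by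
  fun_induction pvSplitR sep l with
  | case1 => simp
  | case2 c t h ih => simp
  | case3 c t h ih =>
    cases hx : pvSplitR sep t with
    | nil => exact absurd hx ih
    | cons u us => simp [hx]

theorem pvSplitR_head_prefix (sep : List Char) (l u : List Char) (us : List (List Char))
    (h : pvSplitR sep l = u :: us) : u <+: l := by
  induction l using pvSplitR.induct sep generalizing u us with
  | case1 => simp [pvSplitR_nil] at h; simp [h.1]
  | case2 c t hcond ih =>
    rw [pvSplitR_pos sep c t hcond.1 hcond.2] at h
    have : u = [] := (List.cons_eq_cons.mp h).1.symm
    simp [this]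
  | case3 c t hcond ih =>
    rw [pvSplitR] at h
    rw [dif_neg hcond] at h
    cases hx : pvSplitR sep t with
    | nil => exact absurd hx (pvSplitR_ne_nil sep t)
    | cons v vs =>
      rw [hx] at h
      simp at h
      obtain ⟨h1, h2⟩ := h
      subst h1
      exact List.cons_prefix_cons.mpr ⟨rfl, ih v vs hx⟩

theorem pvMH_id {α : Type} (X : List α) : X.modifyHead (fun x => x) = X := by
  cases X <;> simp

-- bridge: PySem's fuel-based splitOn agrees with pvSplitR
theorem pvGo_eq (sep : List Char) (hsep : sep ≠ []) :
    ∀ (fuel : Nat) (l cur : List Char) (acc : List (List Char)), l.length < fuel →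
      PySem.Chars.splitOn.go sep fuel l cur acc
        = acc.reverse ++ (pvSplitR sep l).modifyHead (cur.reverse ++ ·) := by
  intro fuel
  induction fuel with
  | zero => intro l cur acc h; omega
  | succ n ih =>
    intro l cur acc h
    cases l with
    | nil =>
      rw [PySem.Chars.splitOn.go]
      · simp [pvSplitR_nil]
      · omega
    | cons c t =>
      rw [PySem.Chars.splitOn.go]
      by_cases hp : List.isPrefixOf sep (c :: t)
      · rw [if_pos hp]
        rw [ih]
        · rw [pvSplitR_pos sep c t hsep hp]
          simp [pvMH_id]
        · have hple : sep.length ≤ (c :: t).length :=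
            (List.isPrefixOf_iff_prefix.mp hp).length_le
          have hs : 0 < sep.length := List.length_pos_iff.mpr hsep
          simp at h hple ⊢
          omega
      · rw [if_neg hp]
        rw [ih]
        · rw [pvSplitR_neg sep c t hp]
          cases hx : pvSplitR sep t with
          | nil => exact absurd hx (pvSplitR_ne_nil sep t)
          | cons u us => simp [hx]
        · simp at h ⊢; omega

theorem pvSplitOn_eq (sep : List Char) (hsep : sep ≠ []) (l : List Char) :
    PySem.Chars.splitOn l sep = pvSplitR sep l := by
  unfold PySem.Chars.splitOn
  rw [pvGo_eq sep hsep (l.length + 1) l [] [] (by omega)]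
  cases hx : pvSplitR sep l with
  | nil => exact absurd hx (pvSplitR_ne_nil sep l)
  | cons u us => simp

-- the sequential three-split pipeline of A, as one function of the char list
def pvSeq (l : List Char) : List (List Char) :=
  (((pvSplitR ['\"', ',', ' ', '\"'] l).flatMap (pvSplitR [']', ' ', '['])).flatMap (pvSplitR [';', ' ']))

theorem pvMH {α : Type} (f g : α → α) (X : List α) :
    (X.modifyHead g).modifyHead f = X.modifyHead (fun x => f (g x)) := by
  cases X <;> simp

theorem pvSeq_nil : pvSeq [] = [[]] := by
  simp [pvSeq, pvSplitR_nil]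

theorem pvNotPre (a b : Char) (s l : List Char) (hab : a ≠ b) :
    ¬ List.isPrefixOf (a :: s) (b :: l) := by
  intro hq
  rcases List.cons_prefix_cons.mp (List.isPrefixOf_iff_prefix.mp hq) with ⟨h', _⟩
  exact hab h'

theorem pvPre (s l : List Char) : List.isPrefixOf s (s ++ l) := by
  rw [List.isPrefixOf_iff_prefix]; exact ⟨l, rfl⟩

theorem pvSeq_d1 (l : List Char) (h : List.isPrefixOf ['\"', ',', ' ', '\"'] l) :
    pvSeq l = [] :: pvSeq (l.drop 4) := by
  cases l with
  | nil => simp [List.isPrefixOf] at h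
  | cons c t =>
    rw [pvSeq, pvSplitR_pos _ c t (by simp) h]
    simp [pvSplitR_nil, pvSeq]

theorem pvSeq_d2 (l : List Char) (h1 : ¬ List.isPrefixOf ['\"', ',', ' ', '\"'] l)
    (h : List.isPrefixOf [']', ' ', '['] l) :
    pvSeq l = [] :: pvSeq (l.drop 3) := by
  obtain ⟨r, rfl⟩ := List.isPrefixOf_iff_prefix.mp h
  have e1 : pvSplitR ['\"', ',', ' ', '\"'] (']' :: ' ' :: '[' :: r)
      = (pvSplitR ['\"', ',', ' ', '\"'] r).modifyHead (fun x => ']' :: ' ' :: '[' :: x) := by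
    rw [pvSplitR_neg _ _ _ (pvNotPre _ _ _ _ (by decide)),
        pvSplitR_neg _ _ _ (pvNotPre _ _ _ _ (by decide)),
        pvSplitR_neg _ _ _ (pvNotPre _ _ _ _ (by decide)), pvMH, pvMH]
  cases hx : pvSplitR ['\"', ',', ' ', '\"'] r with
  | nil => exact absurd hx (pvSplitR_ne_nil _ _)
  | cons u us =>
    have e2 : pvSplitR [']', ' ', '['] (']' :: ' ' :: '[' :: u)
        = [] :: pvSplitR [']', ' ', '['] u :=
      pvSplitR_pos _ _ _ (by simp) (pvPre [']', ' ', '['] u)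
    simp only [List.cons_append, List.nil_append, List.drop_succ_cons, List.drop_zero]
    rw [pvSeq, e1, hx]
    simp only [List.modifyHead_cons, List.drop_succ_cons, List.drop_zero, List.flatMap_cons,
      List.flatMap_append, e2, pvSplitR_nil, pvSeq, hx]
    simp [pvSplitR_nil]

theorem pvSeq_d3 (l : List Char) (h1 : ¬ List.isPrefixOf ['\"', ',', ' ', '\"'] l)
    (h2 : ¬ List.isPrefixOf [']', ' ', '['] l)
    (h : List.isPrefixOf [';', ' '] l) :
    pvSeq l = [] :: pvSeq (l.drop 2) := by
  obtain ⟨r, rfl⟩ := List.isPrefixOf_iff_prefix.mp h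
  have e1 : pvSplitR ['\"', ',', ' ', '\"'] (';' :: ' ' :: r)
      = (pvSplitR ['\"', ',', ' ', '\"'] r).modifyHead (fun x => ';' :: ' ' :: x) := by
    rw [pvSplitR_neg _ _ _ (pvNotPre _ _ _ _ (by decide)),
        pvSplitR_neg _ _ _ (pvNotPre _ _ _ _ (by decide)), pvMH]
  cases hx : pvSplitR ['\"', ',', ' ', '\"'] r with
  | nil => exact absurd hx (pvSplitR_ne_nil _ _)
  | cons u us =>
    have e2 : pvSplitR [']', ' ', '['] (';' :: ' ' :: u)
        = (pvSplitR [']', ' ', '['] u).modifyHead (fun x => ';' :: ' ' :: x) := by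
      rw [pvSplitR_neg _ _ _ (pvNotPre _ _ _ _ (by decide)),
          pvSplitR_neg _ _ _ (pvNotPre _ _ _ _ (by decide)), pvMH]
    cases hy : pvSplitR [']', ' ', '['] u with
    | nil => exact absurd hy (pvSplitR_ne_nil _ _)
    | cons v vs =>
      have e3 : pvSplitR [';', ' '] (';' :: ' ' :: v) = [] :: pvSplitR [';', ' '] v :=
        pvSplitR_pos _ _ _ (by simp) (pvPre [';', ' '] v)
      simp only [List.cons_append, List.nil_append, List.drop_succ_cons, List.drop_zero]
      rw [pvSeq, e1, hx]
      simp only [List.modifyHead_cons, List.drop_succ_cons, List.drop_zero, List.flatMap_cons,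
        List.flatMap_append, e2, hy, e3, pvSeq, pvSplitR_nil]
      simp [hx, hy, List.flatMap_cons, List.flatMap_append, List.append_assoc]

theorem pvSeq_cons (c : Char) (t : List Char)
    (h1 : ¬ List.isPrefixOf ['\"', ',', ' ', '\"'] (c :: t))
    (h2 : ¬ List.isPrefixOf [']', ' ', '['] (c :: t))
    (h3 : ¬ List.isPrefixOf [';', ' '] (c :: t)) :
    pvSeq (c :: t) = (pvSeq t).modifyHead (c :: ·) := by
  cases hx : pvSplitR ['\"', ',', ' ', '\"'] t with
  | nil => exact absurd hx (pvSplitR_ne_nil _ _)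
  | cons u us =>
    have hut : u <+: t := pvSplitR_head_prefix _ _ _ _ hx
    have e1 : pvSplitR ['\"', ',', ' ', '\"'] (c :: t) = (c :: u) :: us := by
      rw [pvSplitR_neg _ _ _ h1, hx]; simp
    have h2' : ¬ List.isPrefixOf [']', ' ', '['] (c :: u) := by
      intro hq
      exact h2 (List.isPrefixOf_iff_prefix.mpr
        ((List.isPrefixOf_iff_prefix.mp hq).trans (List.cons_prefix_cons.mpr ⟨rfl, hut⟩)))
    cases hy : pvSplitR [']', ' ', '['] u with
    | nil => exact absurd hy (pvSplitR_ne_nil _ _)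
    | cons v vs =>
      have e2 : pvSplitR [']', ' ', '['] (c :: u) = (c :: v) :: vs := by
        rw [pvSplitR_neg _ _ _ h2', hy]; simp
      have hvu : v <+: u := pvSplitR_head_prefix _ _ _ _ hy
      have h3' : ¬ List.isPrefixOf [';', ' '] (c :: v) := by
        intro hq
        exact h3 (List.isPrefixOf_iff_prefix.mpr
          ((List.isPrefixOf_iff_prefix.mp hq).trans
            (List.cons_prefix_cons.mpr ⟨rfl, hvu.trans hut⟩)))
      cases hz : pvSplitR [';', ' '] v with
      | nil => exact absurd hz (pvSplitR_ne_nil _ _)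
      | cons w ws =>
        have e3 : pvSplitR [';', ' '] (c :: v) = (c :: w) :: ws := by
          rw [pvSplitR_neg _ _ _ h3', hz]; simp
        rw [pvSeq, pvSeq, e1, hx]
        simp [List.flatMap_cons, List.flatMap_append, e2, hy, e3, hz, List.append_assoc]

theorem pvScan_eq_seq : ∀ (n : Nat) (l buf : List Char), l.length ≤ n →
    pvScan l buf = (pvSeq l).modifyHead (buf ++ ·) := by
  intro n
  induction n with
  | zero =>
    intro l buf h
    have : l = [] := List.eq_nil_of_length_eq_zero (Nat.le_zero.mp h)
    subst this
    simp [pvScan, pvSeq_nil]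
  | succ n ih =>
    intro l buf h
    cases l with
    | nil => simp [pvScan, pvSeq_nil]
    | cons c t =>
      rw [pvScan]
      by_cases hp1 : List.isPrefixOf ['\"', ',', ' ', '\"'] (c :: t)
      · rw [if_pos hp1, pvSeq_d1 _ hp1, ih _ [] (by simp at h ⊢; omega)]
        simp [pvMH_id]
      · rw [if_neg hp1]
        by_cases hp2 : List.isPrefixOf [']', ' ', '['] (c :: t)
        · rw [if_pos hp2, pvSeq_d2 _ hp1 hp2, ih _ [] (by simp at h ⊢; omega)]
          simp [pvMH_id]
        · rw [if_neg hp2]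
          by_cases hp3 : List.isPrefixOf [';', ' '] (c :: t)
          · rw [if_pos hp3, pvSeq_d3 _ hp1 hp2 hp3, ih _ [] (by simp at h ⊢; omega)]
            simp [pvMH_id]
          · rw [if_neg hp3, pvSeq_cons _ _ hp1 hp2 hp3, ih _ _ (by simp at h ⊢; omega), pvMH]
            simp

-- ===== VERDICT (by name: the statement is the Claim_ definition above) =====
theorem extract_articles_spec : Claim_equal_extract_articles := by
  intro s _
  unfold Spec_extract_articles extract_articles extract_articles_alt
  rw [pvScan_eq_seq _ _ [] le_rfl]
  have h1 := fun l => pvSplitOn_eq ['\"', ',', ' ', '\"'] (by simp) l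
  have h2 := fun l => pvSplitOn_eq [']', ' ', '['] (by simp) l
  have h3 := fun l => pvSplitOn_eq [';', ' '] (by simp) l
  simp only [h1, h2, h3, ← List.flatMap_def, pvMH_id, List.nil_append]
  rw [← pvSeq]
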